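-- pv_equiv track=rewrite | github.com/Phoenix-Chen-Git/autoProteinMPNN | auto_run_mpnn.py | get_design_positions_excluding_fixed
-- ===== SOURCE A (Python) =====
-- def get_design_positions_excluding_fixed(generated_sequences, fixed_sequences_list):
--     """
--     Finds the occurrences of fixed sequences in the generated sequences.
--     Returns the INDICES of the residues that are NOT part of the fixed sequences (i.e., are designable).
--     """
--     results = [] # List of tuples (chain_id, [list of 1-based indices])
--
--     for chain_id, gen_seq in generated_sequences.items():
--         fixed_indices = set()
--
--         for fixed_seq in fixed_sequences_list:
--             start = 0
--             while True:
--                 idx = gen_seq.find(fixed_seq, start)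
--                 if idx == -1:
--                     break
--                 # Mark these indices as fixed (1-based for MPNN input, but we use 0-based for logic first)
--                 for k in range(idx, idx + len(fixed_seq)):
--                     fixed_indices.add(k)
--                 start = idx + 1 # Continue searching for other occurrences
--
--         # Calculate designable indices (complement of fixed)
--         designable_indices = []
--         for i in range(len(gen_seq)):
--             if i not in fixed_indices:
--                 designable_indices.append(i + 1) # Convert to 1-based index
--
--         if designable_indices:
--             results.append((chain_id, designable_indices))
--
--     return results
-- ===== SOURCE B (Python) =====
-- def get_design_positions_excluding_fixed(generated_sequences, fixed_sequences_list):
--     """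
--     Interval-based re-implementation: collect the (start, end) interval of every
--     pattern match per chain, sort the intervals by start, and sweep once to emit
--     the uncovered (designable) 1-based indices.
--     """
--     results = []
--     for chain_id, gen_seq in generated_sequences.items():
--         n = len(gen_seq)
--         intervals = []
--         for fs in fixed_sequences_list:
--             m = len(fs)
--             if m == 0:
--                 continue
--             idx = gen_seq.find(fs)
--             while idx != -1:
--                 intervals.append((idx, idx + m))
--                 idx = gen_seq.find(fs, idx + 1)
--         intervals.sort(key=lambda iv: iv[0])
--         designable = []
--         pos = 0
--         for s, e in intervals:
--             if pos < s:
--                 designable.extend(range(pos + 1, s + 1))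
--             if pos < e:
--                 pos = e
--         designable.extend(range(pos + 1, n + 1))
--         if designable:
--             results.append((chain_id, designable))
--     return results
-- ===== Notes on version B (the rewrite author's own statement) =====
-- stated objective: alternative
-- what changed: B records one (start,end) interval per pattern match, sorts the intervals by start and emits the uncovered 1-based indices in a single sweep, instead of A's per-character set marking of every match followed by a per-index set-membership scan.
import Mathlib
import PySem

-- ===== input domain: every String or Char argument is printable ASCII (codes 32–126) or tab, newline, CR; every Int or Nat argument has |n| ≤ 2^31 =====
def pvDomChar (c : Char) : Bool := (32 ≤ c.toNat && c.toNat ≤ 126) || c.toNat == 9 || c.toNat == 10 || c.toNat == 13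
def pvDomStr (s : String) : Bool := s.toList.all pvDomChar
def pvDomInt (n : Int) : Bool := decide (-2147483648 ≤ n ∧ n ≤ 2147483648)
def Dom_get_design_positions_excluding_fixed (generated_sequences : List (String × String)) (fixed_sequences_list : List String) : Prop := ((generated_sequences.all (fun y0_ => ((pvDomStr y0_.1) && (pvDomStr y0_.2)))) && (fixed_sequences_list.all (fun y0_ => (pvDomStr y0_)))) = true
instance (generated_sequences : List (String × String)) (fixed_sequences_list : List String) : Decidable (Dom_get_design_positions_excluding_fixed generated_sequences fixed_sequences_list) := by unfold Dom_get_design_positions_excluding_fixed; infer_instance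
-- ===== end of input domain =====

-- B replaces A's per-character set marking with sorted match intervals and a single uncovered-position sweep (alternative algorithm, same measured cost).
-- Port A of auto_run_mpnn.get_design_positions_excluding_fixed; generated_sequences is a Python dict, ported as an association list.

-- ===== PORT A =====
-- A's inner 'while True: idx = gen_seq.find(fixed_seq, start)' loop; fuel seq.length + 2 bounds its iterations
-- (start strictly increases each round and find returns -1 once start exceeds the length).
def pvFindLoopA (seq fs : List Char) : Nat → Int → PySem.Set Int → PySem.Set Int
  | 0, _, fixed => fixed
  | fuel+1, start, fixed =>
    let idx := PySem.Chars.findFrom seq fs start none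
    if idx = -1 then fixed
    else pvFindLoopA seq fs fuel (idx + 1)
      ((PySem.List.pyRange idx (idx + fs.length) 1).foldl PySem.Set.add fixed)

def get_design_positions_excluding_fixed (generated_sequences : List (String × String)) (fixed_sequences_list : List String) : List (String × List Int) :=
  generated_sequences.foldl (fun results ch =>
    let seq := ch.2.toList
    let fixed := fixed_sequences_list.foldl
      (fun fx f => pvFindLoopA seq f.toList (seq.length + 2) 0 fx) PySem.Set.empty
    let designable := (PySem.List.pyRange 0 (seq.length : Int) 1).foldl
      (fun acc i => if PySem.Set.contains fixed i then acc else acc ++ [i + 1]) []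
    if designable = [] then results else results ++ [(ch.1, designable)]) []

-- ===== PORT B =====
-- B's 'idx = gen_seq.find(fs); while idx != -1: append interval; idx = gen_seq.find(fs, idx+1)' loop, same fuel bound.
def pvCollectB (seq fs : List Char) : Nat → Int → List (Int × Int) → List (Int × Int)
  | 0, _, acc => acc
  | fuel+1, idx, acc =>
    if idx = -1 then acc
    else pvCollectB seq fs fuel (PySem.Chars.findFrom seq fs (idx + 1) none)
      (acc ++ [(idx, idx + fs.length)])

-- B's sweep over the intervals sorted by start.
def pvSweepB (n : Int) : List (Int × Int) → Int → List Int → List Int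
  | [], pos, acc => acc ++ PySem.List.pyRange (pos + 1) (n + 1) 1
  | (s, e) :: rest, pos, acc =>
    pvSweepB n rest (if pos < e then e else pos)
      (if pos < s then acc ++ PySem.List.pyRange (pos + 1) (s + 1) 1 else acc)

def get_design_positions_excluding_fixed_alt (generated_sequences : List (String × String)) (fixed_sequences_list : List String) : List (String × List Int) :=
  generated_sequences.foldl (fun results ch =>
    let seq := ch.2.toList
    let ivs := fixed_sequences_list.foldl (fun acc f =>
        if f.toList.length = 0 then acc
        else pvCollectB seq f.toList (seq.length + 2) (PySem.Chars.find seq f.toList) acc) []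
    let designable := pvSweepB (seq.length : Int)
      (PySem.List.sorted ivs (fun iv => iv.1)) 0 []
    if designable = [] then results else results ++ [(ch.1, designable)]) []

-- ===== PRECONDITION & SPEC =====
-- Pre_ only requires the dict keys to be distinct: generated_sequences ports a Python dict, which cannot hold duplicate keys.
def Pre_get_design_positions_excluding_fixed (generated_sequences : List (String × String)) (fixed_sequences_list : List String) : Prop :=
  (generated_sequences.map Prod.fst).Nodup
instance (generated_sequences : List (String × String)) (fixed_sequences_list : List String) : Decidable (Pre_get_design_positions_excluding_fixed generated_sequences fixed_sequences_list) := by unfold Pre_get_design_positions_excluding_fixed; infer_instance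
def pvWitness_get_design_positions_excluding_fixed : (List (String × String)) × List String :=
  ([("A", "CABAB"), ("B", "CC")], ["AB"])


def Spec_get_design_positions_excluding_fixed (generated_sequences : List (String × String)) (fixed_sequences_list : List String) (out : List (String × List Int)) : Prop := out = get_design_positions_excluding_fixed_alt generated_sequences fixed_sequences_list
instance (generated_sequences : List (String × String)) (fixed_sequences_list : List String) (out : List (String × List Int)) : Decidable (Spec_get_design_positions_excluding_fixed generated_sequences fixed_sequences_list out) := by unfold Spec_get_design_positions_excluding_fixed; infer_instance

-- ===== CLAIM (what is proved, stated in full; the proofs are below) =====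
def Claim_equal_get_design_positions_excluding_fixed : Prop := ∀ (generated_sequences : List (String × String)) (fixed_sequences_list : List String), Dom_get_design_positions_excluding_fixed generated_sequences fixed_sequences_list → Pre_get_design_positions_excluding_fixed generated_sequences fixed_sequences_list → Spec_get_design_positions_excluding_fixed generated_sequences fixed_sequences_list (get_design_positions_excluding_fixed generated_sequences fixed_sequences_list)

-- ===== LEMMAS AND PROOFS =====

-- "position i is covered by some interval in ivs"
def pvCov (ivs : List (Int × Int)) (i : Int) : Bool :=
  ivs.any (fun p => decide (p.1 ≤ i) && decide (i < p.2))

theorem pvCollectB_acc (seq fs : List Char) :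
    ∀ (fuel : Nat) (idx : Int) (acc : List (Int × Int)),
    pvCollectB seq fs fuel idx acc = acc ++ pvCollectB seq fs fuel idx [] := by
  intro fuel
  induction fuel with
  | zero => intro idx acc; simp [pvCollectB]
  | succ n ih =>
    intro idx acc
    by_cases h : idx = -1
    · simp [pvCollectB, h]
    · simp only [pvCollectB, if_neg h]
      rw [ih _ (acc ++ [(idx, idx + ↑fs.length)]), ih _ ([] ++ [(idx, idx + ↑fs.length)])]
      simp

-- the bridge: A's set after one pattern's find-loop vs B's interval list for the same pattern
theorem pvBridge (seq fs : List Char) :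
    ∀ (fuel : Nat) (start : Int) (fixed : PySem.Set Int) (i : Int),
    i ∈ pvFindLoopA seq fs fuel start fixed ↔
      i ∈ fixed ∨ pvCov (pvCollectB seq fs fuel (PySem.Chars.findFrom seq fs start none) []) i = true := by
  intro fuel
  induction fuel with
  | zero => intro start fixed i; simp [pvFindLoopA, pvCollectB, pvCov]
  | succ n ih =>
    intro start fixed i
    by_cases h : PySem.Chars.findFrom seq fs start none = -1
    · simp [pvFindLoopA, pvCollectB, h, pvCov]
    · simp only [pvFindLoopA, pvCollectB, if_neg h]
      rw [ih, pvCollectB_acc]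
      have hupd : (PySem.List.pyRange (PySem.Chars.findFrom seq fs start none)
            (PySem.Chars.findFrom seq fs start none + ↑fs.length) 1).foldl PySem.Set.add fixed
          = PySem.Set.update fixed (PySem.List.pyRange (PySem.Chars.findFrom seq fs start none)
            (PySem.Chars.findFrom seq fs start none + ↑fs.length) 1) := rfl
      rw [hupd, PySem.Set.mem_update]
      rw [pvCollectB_acc seq fs n
        (PySem.Chars.findFrom seq fs (PySem.Chars.findFrom seq fs start none + 1) none)
        ([] ++ [(PySem.Chars.findFrom seq fs start none,
          PySem.Chars.findFrom seq fs start none + (fs.length : Int))])]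
      simp only [pvCov, List.any_append, List.any_cons, List.any_nil, Bool.or_eq_true,
        Bool.and_eq_true, decide_eq_true_eq, PySem.List.mem_pyRange_one, List.nil_append]
      tauto

-- every interval B collects has width fs.length
theorem pvCollect_snd (seq fs : List Char) :
    ∀ (fuel : Nat) (idx : Int) (acc : List (Int × Int)),
    (∀ p ∈ acc, p.2 = p.1 + fs.length) →
    ∀ p ∈ pvCollectB seq fs fuel idx acc, p.2 = p.1 + fs.length := by
  intro fuel
  induction fuel with
  | zero => intro idx acc hacc; simpa [pvCollectB] using hacc
  | succ n ih =>
    intro idx acc hacc p hp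
    by_cases h : idx = -1
    · simp only [pvCollectB, if_pos h] at hp; exact hacc _ hp
    · simp only [pvCollectB, if_neg h] at hp
      refine ih _ _ ?_ _ hp
      intro q hq
      rcases List.mem_append.mp hq with hq | hq
      · exact hacc _ hq
      · simp at hq; simp [hq]

-- a find result is -1 or a genuine match position inside the sequence
theorem pvFindFrom_cases (seq fs : List Char) (start : Int) (hs : 0 ≤ start) :
    PySem.Chars.findFrom seq fs start none = -1 ∨
      (0 ≤ PySem.Chars.findFrom seq fs start none ∧
       PySem.Chars.findFrom seq fs start none ≤ (seq.length : Int) ∧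
       fs <+: seq.drop (PySem.Chars.findFrom seq fs start none).toNat) := by
  by_cases hle : start ≤ (seq.length : Int)
  · have hk : start = ((start.toNat : Nat) : Int) := by omega
    have hklen : start.toNat ≤ seq.length := by omega
    by_cases h : PySem.Chars.findFrom seq fs start none = -1
    · exact Or.inl h
    · right
      have hspec := PySem.Chars.findFrom_natCast_spec seq fs start.toNat hklen (by rw [← hk]; exact h)
      rw [← hk] at hspec
      have heq := PySem.Chars.findFrom_natCast seq fs start.toNat hklen
      rw [← hk] at heq
      have hfle := PySem.Chars.find_le_length (seq.drop start.toNat) fs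
      rw [List.length_drop] at hfle
      have hub : PySem.Chars.findFrom seq fs start none ≤ (seq.length : Int) := by
        rw [heq] at h ⊢
        split at h
        · exact absurd rfl h
        · split
          · omega
          · omega
      exact ⟨le_trans hs hspec.1, hub, hspec.2.1⟩
  · left
    have hst : ¬ start < 0 := by omega
    simp only [PySem.Chars.findFrom, if_neg hst]
    rw [if_pos (by omega)]

-- every interval B collects is a well-formed match interval inside the sequence
theorem pvCollect_bounds (seq fs : List Char) :
    ∀ (fuel : Nat) (idx : Int) (acc : List (Int × Int)),
    (∀ p ∈ acc, 0 ≤ p.1 ∧ p.2 ≤ (seq.length : Int)) →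
    (idx = -1 ∨ (0 ≤ idx ∧ idx ≤ (seq.length : Int) ∧ fs <+: seq.drop idx.toNat)) →
    ∀ p ∈ pvCollectB seq fs fuel idx acc, 0 ≤ p.1 ∧ p.2 ≤ (seq.length : Int) := by
  intro fuel
  induction fuel with
  | zero => intro idx acc hacc _; simpa [pvCollectB] using hacc
  | succ n ih =>
    intro idx acc hacc hidx p hp
    by_cases h : idx = -1
    · simp only [pvCollectB, if_pos h] at hp; exact hacc _ hp
    · rcases hidx with hidx | hidx
      · exact absurd hidx h
      · simp only [pvCollectB, if_neg h] at hp
        refine ih _ _ ?_ (pvFindFrom_cases seq fs (idx + 1) (by omega)) _ hp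
        intro q hq
        rcases List.mem_append.mp hq with hq | hq
        · exact hacc _ hq
        · simp at hq
          have h0 : 0 ≤ idx := hidx.1
          have h1 : idx ≤ (seq.length : Int) := hidx.2.1
          have hlen : fs.length ≤ (seq.drop idx.toNat).length := hidx.2.2.length_le
          rw [List.length_drop] at hlen
          constructor
          · simp only [hq]; omega
          · simp only [hq]; omega

-- range(a+1, b+1) is range(a, b) shifted by one
theorem pvRange_map_succ (a b : Int) :
    PySem.List.pyRange (a + 1) (b + 1) 1 = (PySem.List.pyRange a b 1).map (· + 1) := by
  rw [PySem.List.pyRange_one, PySem.List.pyRange_one, List.map_map]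
  have h : (b + 1 - (a + 1)) = b - a := by ring
  rw [h]
  apply List.map_congr_left
  intro x _
  simp only [Function.comp_apply]
  ring

-- the sweep over start-sorted well-formed intervals emits exactly the uncovered 1-based positions
theorem pvSweep_eq (n : Int) :
    ∀ (ivs : List (Int × Int)) (pos : Int) (acc : List Int),
    ivs.Pairwise (fun a b => a.1 ≤ b.1) →
    (∀ p ∈ ivs, p.1 < p.2 ∧ p.2 ≤ n) →
    pvSweepB n ivs pos acc =
      acc ++ ((PySem.List.pyRange pos n 1).filter (fun i => !(pvCov ivs i))).map (· + 1) := by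
  intro ivs
  induction ivs with
  | nil =>
    intro pos acc _ _
    simp [pvSweepB, pvCov, pvRange_map_succ]
  | cons hd rest ih =>
    rcases hd with ⟨s, e⟩
    intro pos acc hpair hP
    have hhd : ∀ b ∈ rest, s ≤ b.1 := by
      intro b hb; exact (List.pairwise_cons.mp hpair).1 b hb
    have hrest : rest.Pairwise (fun a b => a.1 ≤ b.1) := (List.pairwise_cons.mp hpair).2
    have hse : s < e ∧ e ≤ n := hP (s, e) (List.mem_cons_self)
    have hPrest : ∀ p ∈ rest, p.1 < p.2 ∧ p.2 ≤ n := fun p hp => hP p (List.mem_cons_of_mem _ hp)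
    have hcons : ∀ i : Int, pvCov ((s, e) :: rest) i = ((decide (s ≤ i) && decide (i < e)) || pvCov rest i) := by
      intro i; simp [pvCov]
    by_cases hps : pos < s
    · have hpe : pos < e := lt_trans hps hse.1
      simp only [pvSweepB, if_pos hps, if_pos hpe]
      rw [ih _ _ hrest hPrest]
      rw [PySem.List.pyRange_one_append pos s n (le_of_lt hps) (by omega),
          PySem.List.pyRange_one_append s e n (le_of_lt hse.1) hse.2]
      rw [List.filter_append, List.filter_append]
      have h1 : (PySem.List.pyRange pos s 1).filter (fun i => !(pvCov ((s, e) :: rest) i))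
          = PySem.List.pyRange pos s 1 := by
        apply List.filter_eq_self.mpr
        intro i hi
        rw [PySem.List.mem_pyRange_one] at hi
        rw [hcons]
        simp only [Bool.not_eq_eq_eq_not, Bool.not_true, Bool.or_eq_false_iff]
        constructor
        · simp; omega
        · simp only [pvCov, List.any_eq_false]
          intro p hp
          have := hhd p hp
          simp; omega
      have h2 : (PySem.List.pyRange s e 1).filter (fun i => !(pvCov ((s, e) :: rest) i)) = [] := by
        apply List.filter_eq_nil_iff.mpr
        intro i hi
        rw [PySem.List.mem_pyRange_one] at hi
        rw [hcons]
        simp; omega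
      have h3 : (PySem.List.pyRange e n 1).filter (fun i => !(pvCov ((s, e) :: rest) i))
          = (PySem.List.pyRange e n 1).filter (fun i => !(pvCov rest i)) := by
        apply List.filter_congr
        intro i hi
        rw [PySem.List.mem_pyRange_one] at hi
        rw [hcons]
        have : decide (i < e) = false := by simp; omega
        simp [this]
      rw [h1, h2, h3, pvRange_map_succ]
      simp
    · have hps : s ≤ pos := by omega
      simp only [pvSweepB, if_neg (by omega : ¬ pos < s)]
      by_cases hpe : pos < e
      · simp only [if_pos hpe]
        rw [ih _ _ hrest hPrest]
        rw [PySem.List.pyRange_one_append pos e n (le_of_lt hpe) hse.2]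
        rw [List.filter_append]
        have h2 : (PySem.List.pyRange pos e 1).filter (fun i => !(pvCov ((s, e) :: rest) i)) = [] := by
          apply List.filter_eq_nil_iff.mpr
          intro i hi
          rw [PySem.List.mem_pyRange_one] at hi
          rw [hcons]
          simp; omega
        have h3 : (PySem.List.pyRange e n 1).filter (fun i => !(pvCov ((s, e) :: rest) i))
            = (PySem.List.pyRange e n 1).filter (fun i => !(pvCov rest i)) := by
          apply List.filter_congr
          intro i hi
          rw [PySem.List.mem_pyRange_one] at hi
          rw [hcons]
          have : decide (i < e) = false := by simp; omega
          simp [this]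
        rw [h2, h3]
        simp
      · simp only [if_neg hpe]
        rw [ih _ _ hrest hPrest]
        congr 1
        congr 1
        apply List.filter_congr
        intro i hi
        rw [PySem.List.mem_pyRange_one] at hi
        rw [hcons]
        have : decide (i < e) = false := by simp; omega
        simp [this]

-- B's per-chain fold over the pattern list, with a generalized accumulator
theorem pvFoldB_acc (seq : List Char) (fsl : List String) :
    ∀ (acc : List (Int × Int)),
    fsl.foldl (fun acc f =>
        if f.toList.length = 0 then acc
        else pvCollectB seq f.toList (seq.length + 2) (PySem.Chars.find seq f.toList) acc) acc
      = acc ++ fsl.foldl (fun acc f =>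
        if f.toList.length = 0 then acc
        else pvCollectB seq f.toList (seq.length + 2) (PySem.Chars.find seq f.toList) acc) [] := by
  induction fsl with
  | nil => intro acc; simp
  | cons f rest ih =>
    intro acc
    simp only [List.foldl_cons]
    by_cases h : f.toList.length = 0
    · simp only [if_pos h]
      exact ih acc
    · simp only [if_neg h]
      rw [pvCollectB_acc seq f.toList (seq.length + 2) (PySem.Chars.find seq f.toList) acc]
      rw [ih, ih (pvCollectB seq f.toList (seq.length + 2) (PySem.Chars.find seq f.toList) [])]
      rw [List.append_assoc]

-- A's fixed-index set over all patterns vs B's interval list over all patterns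
theorem pvFoldAB (seq : List Char) (fsl : List String) :
    ∀ (fixed : PySem.Set Int) (i : Int),
    i ∈ fsl.foldl (fun fx f => pvFindLoopA seq f.toList (seq.length + 2) 0 fx) fixed ↔
      i ∈ fixed ∨ pvCov (fsl.foldl (fun acc f =>
        if f.toList.length = 0 then acc
        else pvCollectB seq f.toList (seq.length + 2) (PySem.Chars.find seq f.toList) acc) []) i = true := by
  induction fsl with
  | nil => intro fixed i; simp [pvCov]
  | cons f rest ih =>
    intro fixed i
    simp only [List.foldl_cons]
    rw [ih]
    have hbr := pvBridge seq f.toList (seq.length + 2) 0 fixed i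
    rw [PySem.Chars.findFrom_zero] at hbr
    rw [hbr]
    by_cases h : f.toList.length = 0
    · have hz : pvCov (pvCollectB seq f.toList (seq.length + 2) (PySem.Chars.find seq f.toList) []) i = false := by
        simp only [pvCov, List.any_eq_false]
        intro p hp
        have hps := pvCollect_snd seq f.toList (seq.length + 2) _ [] (by simp) p hp
        have hps' : p.2 = p.1 := by rw [h] at hps; simpa using hps
        rw [hps']
        by_cases hpi : p.1 ≤ i
        · have : decide (i < p.1) = false := by simp; omega
          simp [this]
        · have : decide (p.1 ≤ i) = false := by simp; omega
          simp [this]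
      rw [if_pos h, hz]
      tauto
    · rw [if_neg h,
        pvFoldB_acc seq rest (pvCollectB seq f.toList (seq.length + 2) (PySem.Chars.find seq f.toList) [])]
      simp only [pvCov, List.any_append, Bool.or_eq_true]
      tauto

-- every interval in B's collected list is well-formed and inside the chain
theorem pvFoldB_bounds (seq : List Char) (fsl : List String) :
    ∀ (acc : List (Int × Int)),
    (∀ p ∈ acc, 0 ≤ p.1 ∧ p.1 < p.2 ∧ p.2 ≤ (seq.length : Int)) →
    ∀ p ∈ fsl.foldl (fun acc f =>
        if f.toList.length = 0 then acc
        else pvCollectB seq f.toList (seq.length + 2) (PySem.Chars.find seq f.toList) acc) acc,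
      0 ≤ p.1 ∧ p.1 < p.2 ∧ p.2 ≤ (seq.length : Int) := by
  induction fsl with
  | nil => intro acc hacc; simpa using hacc
  | cons f rest ih =>
    intro acc hacc
    simp only [List.foldl_cons]
    by_cases h : f.toList.length = 0
    · simp only [if_pos h]; exact ih acc hacc
    · simp only [if_neg h]
      apply ih
      intro p hp
      rw [pvCollectB_acc] at hp
      rcases List.mem_append.mp hp with hp | hp
      · exact hacc _ hp
      · have hcases := pvFindFrom_cases seq f.toList 0 le_rfl
        rw [PySem.Chars.findFrom_zero] at hcases
        have hb := pvCollect_bounds seq f.toList (seq.length + 2) _ [] (by simp) hcases p hp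
        have hs := pvCollect_snd seq f.toList (seq.length + 2) _ [] (by simp) p hp
        have h1 : 1 ≤ f.toList.length := Nat.one_le_iff_ne_zero.mpr h
        refine ⟨hb.1, ?_, hb.2⟩
        omega

-- per-chain: A's designable list equals B's
theorem pvChain_eq (fsl : List String) (s : String) :
    (PySem.List.pyRange 0 (s.toList.length : Int) 1).foldl
      (fun acc i => if PySem.Set.contains (fsl.foldl
          (fun fx f => pvFindLoopA s.toList f.toList (s.toList.length + 2) 0 fx) PySem.Set.empty) i
        then acc else acc ++ [i + 1]) []
    = pvSweepB (s.toList.length : Int)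
        (PySem.List.sorted (fsl.foldl (fun acc f =>
          if f.toList.length = 0 then acc
          else pvCollectB s.toList f.toList (s.toList.length + 2) (PySem.Chars.find s.toList f.toList) acc) [])
          (fun iv => iv.1)) 0 [] := by
  have hfun : (fun (acc : List Int) (i : Int) => if PySem.Set.contains (fsl.foldl
          (fun fx f => pvFindLoopA s.toList f.toList (s.toList.length + 2) 0 fx) PySem.Set.empty) i
        then acc else acc ++ [i + 1])
      = (fun (acc : List Int) (i : Int) => if !(PySem.Set.contains (fsl.foldl
          (fun fx f => pvFindLoopA s.toList f.toList (s.toList.length + 2) 0 fx) PySem.Set.empty) i)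
        then acc ++ [i + 1] else acc) := by
    funext acc i
    by_cases hc : PySem.Set.contains (fsl.foldl
        (fun fx f => pvFindLoopA s.toList f.toList (s.toList.length + 2) 0 fx) PySem.Set.empty) i
    · simp [hc]
    · simp [hc]
  rw [hfun, PySem.List.foldl_append_if]
  have hpair : (PySem.List.sorted (fsl.foldl (fun acc f =>
          if f.toList.length = 0 then acc
          else pvCollectB s.toList f.toList (s.toList.length + 2) (PySem.Chars.find s.toList f.toList) acc) [])
        (fun iv => iv.1)).Pairwise (fun a b => a.1 ≤ b.1) :=
    PySem.List.sorted_pairwise (fsl.foldl (fun acc f =>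
          if f.toList.length = 0 then acc
          else pvCollectB s.toList f.toList (s.toList.length + 2) (PySem.Chars.find s.toList f.toList) acc) [])
      (fun iv : Int × Int => iv.1)
  have hbounds : ∀ p ∈ PySem.List.sorted (fsl.foldl (fun acc f =>
          if f.toList.length = 0 then acc
          else pvCollectB s.toList f.toList (s.toList.length + 2) (PySem.Chars.find s.toList f.toList) acc) [])
        (fun iv => iv.1) false, p.1 < p.2 ∧ p.2 ≤ (s.toList.length : Int) := by
    intro p hp
    rw [PySem.List.mem_sorted] at hp
    have := pvFoldB_bounds s.toList fsl [] (by simp) p hp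
    exact ⟨this.2.1, this.2.2⟩
  rw [pvSweep_eq (s.toList.length : Int) _ 0 [] hpair hbounds]
  rw [List.nil_append, List.nil_append]
  congr 1
  apply List.filter_congr
  intro i hi
  have hcov : PySem.Set.contains (fsl.foldl
      (fun fx f => pvFindLoopA s.toList f.toList (s.toList.length + 2) 0 fx) PySem.Set.empty) i
      = pvCov (PySem.List.sorted (fsl.foldl (fun acc f =>
          if f.toList.length = 0 then acc
          else pvCollectB s.toList f.toList (s.toList.length + 2) (PySem.Chars.find s.toList f.toList) acc) [])
        (fun iv => iv.1)) i := by
    apply Bool.coe_iff_coe.mp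
    rw [PySem.Set.contains_iff]
    rw [pvFoldAB]
    have hperm : pvCov (PySem.List.sorted (fsl.foldl (fun acc f =>
          if f.toList.length = 0 then acc
          else pvCollectB s.toList f.toList (s.toList.length + 2) (PySem.Chars.find s.toList f.toList) acc) [])
        (fun iv => iv.1)) i = pvCov (fsl.foldl (fun acc f =>
          if f.toList.length = 0 then acc
          else pvCollectB s.toList f.toList (s.toList.length + 2) (PySem.Chars.find s.toList f.toList) acc) []) i := by
      unfold pvCov
      exact (PySem.List.sorted_perm _ (fun iv : Int × Int => iv.1) false).any_eq
    rw [hperm]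
    simp [PySem.Set.empty]
  rw [hcov]

-- ===== VERDICT (by name: the statement is the Claim_ definition above) =====
theorem get_design_positions_excluding_fixed_spec : Claim_equal_get_design_positions_excluding_fixed := by
  intro generated_sequences fixed_sequences_list _ _
  show get_design_positions_excluding_fixed generated_sequences fixed_sequences_list
      = get_design_positions_excluding_fixed_alt generated_sequences fixed_sequences_list
  unfold get_design_positions_excluding_fixed get_design_positions_excluding_fixed_alt
  congr 1
  funext results ch
  simp only
  rw [pvChain_eq fixed_sequences_list ch.2]
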